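-- pv_equiv track=rewrite | github.com/AlexIoannides/llmz | src/llmz/train.py | _build_epoch_step_generator
-- ===== SOURCE A (Python) =====
-- from collections.abc import Callable, Generator
--
-- def _build_epoch_step_generator(
--         epochs: int, steps_per_epoch: int, current_step: int
--     ) -> Generator[tuple[int, int]]:
--     """TODO."""
--     total_steps = epochs * steps_per_epoch
--     num_remaining_steps_ex_current = total_steps - current_step
--
--     steps_left_in_current_epoch = num_remaining_steps_ex_current % steps_per_epoch
--     num_whole_epochs_remaining = num_remaining_steps_ex_current // steps_per_epoch
--     current_epoch = (epochs - num_whole_epochs_remaining)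
--
--     if steps_left_in_current_epoch > 0:
--         for _ in range(steps_per_epoch):
--             yield (current_epoch, current_step)
--             current_step += 1
--         current_epoch += 1
--
--     for epoch in range(current_epoch, epochs):
--         for _ in range(steps_per_epoch):
--             yield (epoch, current_step)
--             current_step += 1
-- ===== SOURCE B (Python) =====
-- def _build_epoch_step_generator(epochs, steps_per_epoch, current_step):
--     """Flat single-loop re-implementation: derive the epoch by division."""
--     rem = epochs * steps_per_epoch - current_step
--     whole = rem // steps_per_epoch
--     start_epoch = epochs - whole
--     if whole > 0:
--         count = whole * steps_per_epoch
--     elif rem % steps_per_epoch > 0: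
--         count = steps_per_epoch
--     else:
--         count = 0
--     for i in range(count):
--         yield (start_epoch + i // steps_per_epoch, current_step + i)
-- ===== Notes on version B (the rewrite author's own statement) =====
-- stated objective: simpler
-- what changed: Replaces A's conditional partial-block loop plus two nested epoch/step loops with a precomputed remaining-step count and one flat indexed loop that derives the epoch by integer division.
import Mathlib
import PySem

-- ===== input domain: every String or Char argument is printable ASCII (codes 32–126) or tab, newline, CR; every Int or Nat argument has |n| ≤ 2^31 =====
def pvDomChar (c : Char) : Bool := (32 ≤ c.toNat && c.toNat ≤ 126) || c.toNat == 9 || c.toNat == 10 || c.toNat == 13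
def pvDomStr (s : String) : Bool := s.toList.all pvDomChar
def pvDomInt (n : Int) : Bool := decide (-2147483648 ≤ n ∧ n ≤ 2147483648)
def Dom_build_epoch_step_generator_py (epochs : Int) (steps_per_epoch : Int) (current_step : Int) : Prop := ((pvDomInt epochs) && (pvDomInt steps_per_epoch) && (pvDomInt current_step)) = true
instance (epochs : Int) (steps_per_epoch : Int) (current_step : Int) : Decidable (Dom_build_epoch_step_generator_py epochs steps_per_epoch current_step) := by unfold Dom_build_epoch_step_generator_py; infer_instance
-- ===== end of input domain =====

-- B replaces A's partial-block branch plus two nested loops by a precomputed step count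
-- and one flat indexed loop that derives each epoch by integer division (objective: simpler).

-- ===== PORT A =====
def build_epoch_step_generator_py (epochs : Int) (steps_per_epoch : Int) (current_step : Int) : List (Int × Int) :=
  let total_steps := epochs * steps_per_epoch
  let num_remaining_steps_ex_current := total_steps - current_step
  let steps_left_in_current_epoch := PySem.Int.mod num_remaining_steps_ex_current steps_per_epoch
  let num_whole_epochs_remaining := PySem.Int.floordiv num_remaining_steps_ex_current steps_per_epoch
  let current_epoch := epochs - num_whole_epochs_remaining
  -- the `if steps_left > 0` block: yields one block and advances current_step/current_epoch
  let st : List (Int × Int) × Int × Int :=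
    if steps_left_in_current_epoch > 0 then
      let p := (PySem.List.pyRange 0 steps_per_epoch 1).foldl
        (fun (p : List (Int × Int) × Int) _ => ((current_epoch, p.2) :: p.1, p.2 + 1))
        ([], current_step)
      (p.1, p.2, current_epoch + 1)
    else ([], current_step, current_epoch)
  -- `for epoch in range(current_epoch, epochs): for _ in range(steps_per_epoch): yield …`
  let q := (PySem.List.pyRange st.2.2 epochs 1).foldl
    (fun (p : List (Int × Int) × Int) epoch =>
      (PySem.List.pyRange 0 steps_per_epoch 1).foldl
        (fun (q : List (Int × Int) × Int) _ => ((epoch, q.2) :: q.1, q.2 + 1)) p)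
    (st.1, st.2.1)
  -- the yielded pairs are accumulated by consing and reversed once at the end
  q.1.reverse

-- ===== PORT B =====
def build_epoch_step_generator_py_alt (epochs : Int) (steps_per_epoch : Int) (current_step : Int) : List (Int × Int) :=
  let rem := epochs * steps_per_epoch - current_step
  let whole := PySem.Int.floordiv rem steps_per_epoch
  let start_epoch := epochs - whole
  let count :=
    if whole > 0 then whole * steps_per_epoch
    else if PySem.Int.mod rem steps_per_epoch > 0 then steps_per_epoch
    else 0
  (PySem.List.pyRange 0 count 1).map
    (fun i => (start_epoch + PySem.Int.floordiv i steps_per_epoch, current_step + i))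

-- ===== PRECONDITION & SPEC =====
-- Pre_ excludes steps_per_epoch = 0, on which A raises ZeroDivisionError.
def Pre_build_epoch_step_generator_py (epochs : Int) (steps_per_epoch : Int) (current_step : Int) : Prop :=
  steps_per_epoch ≠ 0
instance (epochs : Int) (steps_per_epoch : Int) (current_step : Int) : Decidable (Pre_build_epoch_step_generator_py epochs steps_per_epoch current_step) := by unfold Pre_build_epoch_step_generator_py; infer_instance

def pvWitness_build_epoch_step_generator_py : Int × Int × Int := (3, 4, 5)

def Spec_build_epoch_step_generator_py (epochs : Int) (steps_per_epoch : Int) (current_step : Int) (out : List (Int × Int)) : Prop := out = build_epoch_step_generator_py_alt epochs steps_per_epoch current_step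
instance (epochs : Int) (steps_per_epoch : Int) (current_step : Int) (out : List (Int × Int)) : Decidable (Spec_build_epoch_step_generator_py epochs steps_per_epoch current_step out) := by unfold Spec_build_epoch_step_generator_py; infer_instance

-- ===== CLAIM (what is proved, stated in full; the proofs are below) =====
def Claim_equal_build_epoch_step_generator_py : Prop := ∀ (epochs : Int) (steps_per_epoch : Int) (current_step : Int), Dom_build_epoch_step_generator_py epochs steps_per_epoch current_step → Pre_build_epoch_step_generator_py epochs steps_per_epoch current_step → Spec_build_epoch_step_generator_py epochs steps_per_epoch current_step (build_epoch_step_generator_py epochs steps_per_epoch current_step)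

-- ===== LEMMAS AND PROOFS =====

-- one epoch's block of (epoch, step) pairs
def pvBlk (s ep c : Int) : List (Int × Int) :=
  (List.range s.toNat).map (fun (j : Nat) => (ep, c + (j : Int)))

-- k consecutive epoch blocks
def pvBlocks : Nat → Int → Int → Int → List (Int × Int)
  | 0, _, _, _ => []
  | k + 1, s, ep, c => pvBlk s ep c ++ pvBlocks k s (ep + 1) (c + s)

lemma pvBlocks_snoc (k : Nat) : ∀ (s ep c : Int),
    pvBlocks (k + 1) s ep c = pvBlocks k s ep c ++ pvBlk s (ep + k) (c + k * s) := by
  induction k with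
  | zero => intro s ep c; simp [pvBlocks]
  | succ k ih =>
      intro s ep c
      have h1 : pvBlocks (k + 1 + 1) s ep c
          = pvBlk s ep c ++ pvBlocks (k + 1) s (ep + 1) (c + s) := rfl
      have h2 : pvBlocks (k + 1) s ep c
          = pvBlk s ep c ++ pvBlocks k s (ep + 1) (c + s) := rfl
      rw [h1, ih, h2, List.append_assoc]
      have e1 : ep + 1 + (k : Int) = ep + ((k + 1 : Nat) : Int) := by push_cast; ring
      have e2 : c + s + (k : Int) * s = c + ((k + 1 : Nat) : Int) * s := by push_cast; ring
      rw [e1, e2]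

-- A's inner `for _ in range(steps_per_epoch)` loop, over an arbitrary list
lemma pvBlockFold (ep : Int) (l : List Int) : ∀ (acc : List (Int × Int)) (c : Int),
    l.foldl (fun (p : List (Int × Int) × Int) _ => ((ep, p.2) :: p.1, p.2 + 1)) (acc, c)
      = (((List.range l.length).map (fun (j : Nat) => (ep, c + (j : Int)))).reverse ++ acc,
          c + l.length) := by
  induction l with
  | nil => intro acc c; simp
  | cons x t ih =>
      intro acc c
      rw [List.foldl_cons, ih, List.length_cons, Prod.mk.injEq]
      refine ⟨?_, by push_cast; ring⟩
      rw [List.range_succ_eq_map, List.map_cons, List.reverse_cons, List.map_map,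
        List.append_assoc, List.singleton_append]
      simp only [Nat.cast_zero, add_zero]
      congr 2
      refine List.map_congr_left (fun j _ => ?_)
      simp only [Function.comp]
      rw [Prod.mk.injEq]
      exact ⟨rfl, by push_cast; ring⟩

-- A's inner loop over range(s) for 0 < s
lemma pvInnerFold (s : Int) (hs : 0 < s) (ep : Int) (acc : List (Int × Int)) (c : Int) :
    (PySem.List.pyRange 0 s 1).foldl
        (fun (p : List (Int × Int) × Int) _ => ((ep, p.2) :: p.1, p.2 + 1)) (acc, c)
      = ((pvBlk s ep c).reverse ++ acc, c + s) := by
  rw [pvBlockFold]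
  have hl : (PySem.List.pyRange 0 s 1).length = s.toNat := by
    simp [PySem.List.length_pyRange_one 0 s]
  rw [hl, Prod.mk.injEq]
  exact ⟨rfl, by omega⟩

-- A's outer epoch loop produces consecutive blocks
lemma pvOuterFold (s : Int) (hs : 0 < s) (n : Nat) : ∀ (a c : Int) (acc : List (Int × Int)),
    (PySem.List.pyRange a (a + (n : Int)) 1).foldl
        (fun (p : List (Int × Int) × Int) epoch =>
          (PySem.List.pyRange 0 s 1).foldl
            (fun (q : List (Int × Int) × Int) _ => ((epoch, q.2) :: q.1, q.2 + 1)) p)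
        (acc, c)
      = ((pvBlocks n s a c).reverse ++ acc, c + (n : Int) * s) := by
  induction n with
  | zero =>
      intro a c acc
      rw [show a + ((0 : Nat) : Int) = a by simp, PySem.List.pyRange_one_eq_nil le_rfl]
      simp [pvBlocks]
  | succ n ih =>
      intro a c acc
      have hcons := PySem.List.pyRange_one_cons (a := a) (b := a + ((n + 1 : Nat) : Int))
        (by push_cast; omega)
      rw [hcons]
      simp only [List.foldl_cons]
      rw [pvInnerFold s hs a acc c]
      have hb : a + ((n + 1 : Nat) : Int) = (a + 1) + (n : Int) := by push_cast; ring
      rw [hb, ih (a + 1) (c + s) ((pvBlk s a c).reverse ++ acc), Prod.mk.injEq]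
      constructor
      · simp [pvBlocks, List.reverse_append, List.append_assoc]
      · push_cast; ring

-- the outer loop with an arbitrary upper bound
lemma pvOuterFold' (s : Int) (hs : 0 < s) (a b c : Int) (acc : List (Int × Int)) (hab : a ≤ b) :
    (PySem.List.pyRange a b 1).foldl
        (fun (p : List (Int × Int) × Int) epoch =>
          (PySem.List.pyRange 0 s 1).foldl
            (fun (q : List (Int × Int) × Int) _ => ((epoch, q.2) :: q.1, q.2 + 1)) p)
        (acc, c)
      = ((pvBlocks (b - a).toNat s a c).reverse ++ acc, c + ((b - a).toNat : Int) * s) := by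
  have h := pvOuterFold s hs (b - a).toNat a c acc
  rw [show a + (((b - a).toNat : Nat) : Int) = b by omega] at h
  exact h

-- B's flat map over range(k*s) splits into k blocks
lemma pvMapRangeBlocks (s : Int) (hs : 0 < s) (k : Nat) (ep c : Int) :
    (PySem.List.pyRange 0 ((k : Int) * s) 1).map
        (fun i => (ep + PySem.Int.floordiv i s, c + i))
      = pvBlocks k s ep c := by
  induction k with
  | zero =>
      rw [show ((0 : Nat) : Int) * s = 0 by simp, PySem.List.pyRange_one_eq_nil le_rfl]
      rfl
  | succ k ih =>
      rw [PySem.List.pyRange_one_append 0 ((k : Int) * s) (((k + 1 : Nat) : Int) * s)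
            (by positivity) (by push_cast; nlinarith)]
      rw [List.map_append, ih, pvBlocks_snoc]
      congr 1
      rw [PySem.List.pyRange_one (a := (k : Int) * s), List.map_map]
      have harg : ((k + 1 : Nat) : Int) * s - (k : Int) * s = s := by push_cast; ring
      rw [harg]
      refine List.map_congr_left (fun j hj => ?_)
      rw [List.mem_range] at hj
      have hj' : (j : Int) < s := by omega
      have hfd : PySem.Int.floordiv ((k : Int) * s + (j : Int)) s = (k : Int) := by
        rw [PySem.Int.floordiv_eq_iff_of_pos hs]
        exact ⟨by omega, by nlinarith⟩
      simp only [Function.comp, hfd]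
      rw [Prod.mk.injEq]
      exact ⟨rfl, by ring⟩

-- a fold whose body ignores its state-update (empty inner range) is the identity
lemma pvFoldlFixed {α β : Type} (l : List β) (init : α) :
    l.foldl (fun a _ => a) init = init := by
  induction l generalizing init with
  | nil => rfl
  | cons x t ih => simp only [List.foldl_cons]; exact ih init

-- characterisation of A for positive steps_per_epoch
lemma pvA_pos (e s c : Int) (hs : 0 < s) :
    build_epoch_step_generator_py e s c =
      pvBlocks
        (if 0 < PySem.Int.floordiv (e * s - c) s
         then (PySem.Int.floordiv (e * s - c) s).toNat
         else if 0 < PySem.Int.mod (e * s - c) s then 1 else 0)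
        s (e - PySem.Int.floordiv (e * s - c) s) c := by
  simp only [build_epoch_step_generator_py]
  set w := PySem.Int.floordiv (e * s - c) s with hw_def
  set L := PySem.Int.mod (e * s - c) s with hL_def
  by_cases hL : L > 0
  · rw [if_pos hL]
    rw [pvInnerFold s hs (e - w) [] c]
    simp only [List.append_nil]
    by_cases hw : 0 < w
    · rw [pvOuterFold' s hs (e - w + 1) e (c + s) ((pvBlk s (e - w) c).reverse) (by omega)]
      rw [if_pos hw]
      have hk : w.toNat = (e - (e - w + 1)).toNat + 1 := by omega
      rw [hk]
      simp [pvBlocks, List.reverse_append]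
    · rw [PySem.List.pyRange_one_eq_nil (show e ≤ e - w + 1 by omega)]
      simp only [List.foldl_nil]
      rw [if_neg hw, if_pos hL]
      simp [pvBlocks]
  · rw [if_neg hL]
    by_cases hw : 0 < w
    · rw [pvOuterFold' s hs (e - w) e c [] (by omega)]
      rw [if_pos hw]
      simp only [List.append_nil, List.reverse_reverse]
      congr 1
      omega
    · rw [PySem.List.pyRange_one_eq_nil (show e ≤ e - w by omega)]
      simp only [List.foldl_nil]
      rw [if_neg hw, if_neg hL]
      rfl

-- characterisation of B for positive steps_per_epoch
lemma pvB_pos (e s c : Int) (hs : 0 < s) :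
    build_epoch_step_generator_py_alt e s c =
      pvBlocks
        (if 0 < PySem.Int.floordiv (e * s - c) s
         then (PySem.Int.floordiv (e * s - c) s).toNat
         else if 0 < PySem.Int.mod (e * s - c) s then 1 else 0)
        s (e - PySem.Int.floordiv (e * s - c) s) c := by
  simp only [build_epoch_step_generator_py_alt]
  set w := PySem.Int.floordiv (e * s - c) s with hw_def
  set L := PySem.Int.mod (e * s - c) s with hL_def
  by_cases hw : w > 0
  · rw [if_pos hw, if_pos hw]
    rw [show w * s = ((w.toNat : Nat) : Int) * s by rw [Int.toNat_of_nonneg (by omega)]]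
    exact pvMapRangeBlocks s hs w.toNat (e - w) c
  · rw [if_neg hw, if_neg hw]
    by_cases hL : L > 0
    · rw [if_pos hL, if_pos hL]
      have h1 := pvMapRangeBlocks s hs 1 (e - w) c
      rw [show ((1 : Nat) : Int) * s = s by simp] at h1
      exact h1
    · rw [if_neg hL, if_neg hL]
      rw [PySem.List.pyRange_one_eq_nil le_rfl]
      rfl

-- for negative steps_per_epoch every range is empty: A yields nothing
lemma pvA_neg (e s c : Int) (hs : s < 0) : build_epoch_step_generator_py e s c = [] := by
  simp only [build_epoch_step_generator_py]
  have hL := (PySem.Int.mod_neg_bounds (e * s - c) hs).2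
  rw [if_neg (by omega)]
  rw [PySem.List.pyRange_one_eq_nil (le_of_lt hs)]
  simp only [List.foldl_nil]
  rw [pvFoldlFixed]
  rfl

-- for negative steps_per_epoch the computed count is nonpositive: B yields nothing
lemma pvB_neg (e s c : Int) (hs : s < 0) : build_epoch_step_generator_py_alt e s c = [] := by
  simp only [build_epoch_step_generator_py_alt]
  have hL := (PySem.Int.mod_neg_bounds (e * s - c) hs).2
  by_cases hw : PySem.Int.floordiv (e * s - c) s > 0
  · rw [if_pos hw, PySem.List.pyRange_one_eq_nil (by nlinarith)]
    rfl
  · rw [if_neg hw, if_neg (by omega), PySem.List.pyRange_one_eq_nil le_rfl]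
    rfl

-- ===== VERDICT (by name: the statement is the Claim_ definition above) =====
theorem build_epoch_step_generator_py_spec : Claim_equal_build_epoch_step_generator_py := by
  intro e s c _hdom hpre
  unfold Pre_build_epoch_step_generator_py at hpre
  unfold Spec_build_epoch_step_generator_py
  rcases lt_trichotomy s 0 with hs | hs | hs
  · rw [pvA_neg e s c hs, pvB_neg e s c hs]
  · exact (hpre hs).elim
  · rw [pvA_pos e s c hs, pvB_pos e s c hs]
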